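-- pv_equiv track=rewrite | github.com/Shubham-Gaikwad23/algo2 | Problem solving/bracelets.py | check_bracelets
-- ===== SOURCE A (Python) =====
-- def check_bracelets(lst, N):
-- 	if N%2!=0:
-- 		return 0
-- 	lim = int(N/2)
-- 	i=2
-- 	while i <= lim:
-- 		pattern = lst[:i]
-- 		for x in range(i, N, i):
-- 			if pattern != lst[x:x+i]:
-- 				flag = 1
-- 				continue
-- 			else:
-- 				flag = -1
-- 				break
-- 		if flag == 1:
-- 			return 1
-- 		i=i+1
-- 	return 0
-- ===== SOURCE B (Python) =====
-- def _lcp(lst, x):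
--     # length of the longest common prefix of lst and lst[x:]
--     k = 0
--     while x + k < len(lst) and lst[k] == lst[x + k]:
--         k += 1
--     return k
--
-- def check_bracelets(lst, N):
--     if N % 2 != 0:
--         return 0
--     L = len(lst)
--     z = [_lcp(lst, x) for x in range(L)]
--     for i in range(2, N // 2 + 1):
--         # lst[x:x+i] == lst[:i]  iff  L == 0 or (x+i <= L and z[x] >= i)
--         if not any(L == 0 or (x + i <= L and z[x] >= i) for x in range(i, N, i)):
--             return 1
--     return 0
-- ===== Notes on version B (the rewrite author's own statement) =====
-- stated objective: alternative
-- what changed: B precomputes a longest-common-prefix (Z-style) table once and decides each aligned-block-vs-first-block comparison in O(1) from it, replacing A's repeated O(i) slice comparisons.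
import Mathlib
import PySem

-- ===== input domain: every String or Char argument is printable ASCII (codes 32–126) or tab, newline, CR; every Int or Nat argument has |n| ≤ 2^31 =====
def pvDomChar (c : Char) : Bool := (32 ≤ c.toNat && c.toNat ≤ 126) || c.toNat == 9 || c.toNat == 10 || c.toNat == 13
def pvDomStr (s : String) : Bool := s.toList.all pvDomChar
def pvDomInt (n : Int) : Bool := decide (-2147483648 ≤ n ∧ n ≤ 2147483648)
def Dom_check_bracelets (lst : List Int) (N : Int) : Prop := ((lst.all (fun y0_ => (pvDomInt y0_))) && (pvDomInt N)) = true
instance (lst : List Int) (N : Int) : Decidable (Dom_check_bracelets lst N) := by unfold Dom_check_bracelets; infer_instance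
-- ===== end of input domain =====

-- B replaces A's repeated slice comparisons by a precomputed longest-common-prefix table,
-- so each aligned block is compared to the first block in O(1) from the table (objective: alternative algorithm).
-- While loops are encoded with a fuel argument large enough to never be exhausted (totality only).

-- ===== PORT A =====
-- inner 'for x in range(i, N, i)' with flag/continue/break, transliterated
def pvInnerA (lst pattern : List Int) (i : Int) : List Int → Int → Int
  | [], flag => flag
  | x :: xs, _ =>
      if pattern ≠ PySem.List.slice lst (some x) (some (x + i)) then pvInnerA lst pattern i xs 1
      else -1

-- the 'while i <= lim' loop; flag threaded through iterations exactly as in Python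
def pvWhileA (lst : List Int) (N lim : Int) : Nat → Int → Int → Int
  | 0, _, _ => 0
  | fuel + 1, i, flag =>
      if i ≤ lim then
        let pattern := PySem.List.slice lst (some 0) (some i)
        let flag' := pvInnerA lst pattern i (PySem.List.pyRange i N i) flag
        if flag' = 1 then 1 else pvWhileA lst N lim fuel (i + 1) flag'
      else 0

def check_bracelets (lst : List Int) (N : Int) : Int :=
  if PySem.Int.mod N 2 ≠ 0 then 0
  else
    -- int(N/2): N is even here, so true division is exact and equals floor division;
    -- fuel (lim-1) covers every iteration i = 2..lim.
    pvWhileA lst N (PySem.Int.floordiv N 2) (PySem.Int.floordiv N 2 - 1).toNat 2 0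
    -- Python's flag starts unbound; it is read only after an inner loop that is nonempty
    -- whenever the while body runs, so the initial 0 is never observed

-- ===== PORT B =====
-- _lcp(lst, x): while x + k < len(lst) and lst[k] == lst[x+k]: k += 1   (fuel = len(lst) suffices)
def pvLcpB (lst : List Int) (x : Nat) : Nat → Nat → Nat
  | 0, k => k
  | fuel + 1, k =>
      if x + k < lst.length ∧ lst.getD k 0 = lst.getD (x + k) 0 then pvLcpB lst x fuel (k + 1)
      else k

-- the 'for i in range(2, N//2 + 1)' loop with its early return 1
def pvForB (lst : List Int) (z : List Nat) (N : Int) : Nat → Int → Int → Int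
  | 0, _, _ => 0
  | fuel + 1, i, lim =>
      if i ≤ lim then
        if (PySem.List.pyRange i N i).any
            (fun x => decide ((lst.length : Int) = 0) ||
              (decide (x + i ≤ (lst.length : Int)) && decide (i ≤ (z.getD x.toNat 0 : Int)))) then
          pvForB lst z N fuel (i + 1) lim
        else 1
      else 0

def check_bracelets_alt (lst : List Int) (N : Int) : Int :=
  if PySem.Int.mod N 2 ≠ 0 then 0
  else
    let z := (List.range lst.length).map (fun x => pvLcpB lst x lst.length 0)
    pvForB lst z N (PySem.Int.floordiv N 2 - 1).toNat 2 (PySem.Int.floordiv N 2)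

-- ===== PRECONDITION & SPEC =====
def Spec_check_bracelets (lst : List Int) (N : Int) (out : Int) : Prop := out = check_bracelets_alt lst N
instance (lst : List Int) (N : Int) (out : Int) : Decidable (Spec_check_bracelets lst N out) := by unfold Spec_check_bracelets; infer_instance

-- ===== CLAIM (what is proved, stated in full; the proofs are below) =====
def Claim_equal_check_bracelets : Prop := ∀ (lst : List Int) (N : Int), Dom_check_bracelets lst N → Spec_check_bracelets lst N (check_bracelets lst N)

-- ===== LEMMAS AND PROOFS =====

-- 'n ≤ number of leading matches of lst and lst[x:]' characterised positionally (fuel never exhausted)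
theorem check_bracelets_lcp_ge (lst : List Int) (x : Nat) (n : Nat) :
    ∀ (fuel k : Nat), lst.length ≤ x + k + fuel →
    (n ≤ pvLcpB lst x fuel k ↔
      n ≤ k ∨ (∀ j : Nat, k ≤ j → j < n → x + j < lst.length ∧ lst.getD j 0 = lst.getD (x + j) 0)) := by
  intro fuel
  induction fuel with
  | zero =>
    intro k hfk
    rw [pvLcpB]
    constructor
    · intro hk; left; exact hk
    · rintro (hk | hall)
      · exact hk
      · by_contra hn
        have := (hall k (le_refl k) (by omega)).1
        omega
  | succ fuel ih =>
    intro k hfk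
    rw [pvLcpB]
    split
    · rename_i h
      rw [ih (k + 1) (by omega)]
      constructor
      · rintro (hk | hall)
        · rcases Nat.lt_or_ge k n with hkn | hkn
          · right; intro j hj1 hj2
            have : j = k := by omega
            subst this; exact h
          · left; omega
        · rcases Nat.lt_or_ge k n with hkn | hkn
          · right; intro j hj1 hj2
            rcases Nat.eq_or_lt_of_le hj1 with rfl | hlt
            · exact h
            · exact hall j hlt hj2
          · left; omega
      · rintro (hk | hall)
        · left; omega
        · right; intro j hj1 hj2; exact hall j (by omega) hj2
    · rename_i h
      constructor
      · intro hk; left; exact hk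
      · rintro (hk | hall)
        · exact hk
        · by_contra hn
          exact h (hall k (le_refl k) (by omega))

-- lst[:n] = lst[m:][:n] in terms of the lcp value (Nat level)
theorem check_bracelets_block_nat (lst : List Int) (m n : Nat) (hn : 1 ≤ n) (hm : 1 ≤ m) :
    (lst.take n = (lst.drop m).take n) ↔
      (lst.length = 0 ∨ (m + n ≤ lst.length ∧ n ≤ pvLcpB lst m lst.length 0)) := by
  by_cases hL : lst.length = 0
  · rw [List.length_eq_zero_iff] at hL
    subst hL; simp
  · constructor
    · intro h
      have hlen := congrArg List.length h
      simp [List.length_take, List.length_drop] at hlen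
      have hmn : m + n ≤ lst.length := by omega
      right
      refine ⟨hmn, ?_⟩
      rw [check_bracelets_lcp_ge lst m n lst.length 0 (by omega)]
      right
      intro j _ hj
      have hjL : j < lst.length := by omega
      have hmjL : m + j < lst.length := by omega
      have h1 : (lst.take n)[j]'(by simp [List.length_take]; omega) =
                ((lst.drop m).take n)[j]'(by simp [List.length_take, List.length_drop]; omega) := by
        congr 1
      simp [List.getElem_take, List.getElem_drop] at h1
      constructor
      · omega
      · rw [List.getD_eq_getElem lst 0 hjL, List.getD_eq_getElem lst 0 hmjL]
        exact h1
    · rintro (h | ⟨hmn, hlcp⟩)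
      · omega
      · have hall := (check_bracelets_lcp_ge lst m n lst.length 0 (by omega)).mp hlcp
        rcases hall with h0 | hall
        · omega
        · apply List.ext_getElem
          · simp [List.length_take, List.length_drop]; omega
          · intro j hj1 hj2
            simp [List.length_take] at hj1
            simp [List.getElem_take, List.getElem_drop]
            have := hall j (by omega) (by omega)
            rw [List.getD_eq_getElem lst 0 (by omega), List.getD_eq_getElem lst 0 (by omega)] at this
            exact this.2

-- the slice comparison A makes, in terms of the lcp value (Int level)
theorem check_bracelets_block_eq (lst : List Int) (i x : Int) (hi : 2 ≤ i) (hx : i ≤ x) :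
    (PySem.List.slice lst (some 0) (some i) = PySem.List.slice lst (some x) (some (x + i))) ↔
      (lst.length = 0 ∨ (x + i ≤ (lst.length : Int) ∧ i ≤ (pvLcpB lst x.toNat lst.length 0 : Int))) := by
  rw [PySem.List.slice_zero_start, PySem.List.slice_to lst (by omega : (0:Int) ≤ i),
      PySem.List.slice_toNat lst (by omega : (0:Int) ≤ x) (by omega : (0:Int) ≤ x + i)]
  have h1 : (x + i).toNat - x.toNat = i.toNat := by omega
  rw [h1, check_bracelets_block_nat lst x.toNat i.toNat (by omega) (by omega)]
  constructor
  · rintro (h | ⟨h1, h2⟩)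
    · left; exact h
    · right; constructor <;> omega
  · rintro (h | ⟨h1, h2⟩)
    · left; exact h
    · right; constructor <;> omega

-- A's inner for-loop is an existence test over the block starts
theorem check_bracelets_innerA_eq (lst pattern : List Int) (i : Int) :
    ∀ (xs : List Int) (flag : Int),
      pvInnerA lst pattern i xs flag =
        if xs.any (fun x => decide (pattern = PySem.List.slice lst (some x) (some (x + i)))) then -1
        else if xs.isEmpty then flag else 1 := by
  intro xs
  induction xs with
  | nil => intro flag; simp [pvInnerA]
  | cons x xs ih =>
    intro flag
    rw [pvInnerA]
    by_cases h : pattern = PySem.List.slice lst (some x) (some (x + i))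
    · simp [h]
    · simp only [h, ne_eq, not_false_iff, if_true, ih 1]
      simp [h]

-- B's per-block boolean test agrees with A's slice comparison, for block starts x ≥ i
theorem check_bracelets_test_eq (lst : List Int) (i x : Int) (hi : 2 ≤ i) (hx : i ≤ x) :
    decide (PySem.List.slice lst (some 0) (some i) = PySem.List.slice lst (some x) (some (x + i))) =
      (decide ((lst.length : Int) = 0) ||
        (decide (x + i ≤ (lst.length : Int)) &&
          decide (i ≤ (((List.range lst.length).map (fun y => pvLcpB lst y lst.length 0)).getD x.toNat 0 : Int)))) := by
  rw [Bool.eq_iff_iff]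
  simp only [decide_eq_true_eq, Bool.or_eq_true, Bool.and_eq_true]
  by_cases hxL : x.toNat < lst.length
  · rw [PySem.List.getD_map_range _ _ _ _ hxL, check_bracelets_block_eq lst i x hi hx]
    omega
  · rw [check_bracelets_block_eq lst i x hi hx]
    omega

-- the two outer loops agree (N even, lim = N//2, both fuels sufficient)
theorem check_bracelets_loop_eq (lst : List Int) (N lim : Int)
    (hev : PySem.Int.mod N 2 = 0) (hlim : lim = PySem.Int.floordiv N 2) :
    ∀ (fa fb : Nat) (i flag : Int), 2 ≤ i →
      (lim + 1 - i).toNat ≤ fa → (lim + 1 - i).toNat ≤ fb →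
      pvWhileA lst N lim fa i flag =
        pvForB lst ((List.range lst.length).map (fun y => pvLcpB lst y lst.length 0)) N fb i lim := by
  have hdvd : (2:Int) ∣ N := (PySem.Int.mod_eq_zero_iff_dvd N 2).mp hev
  have hN2 : PySem.Int.floordiv N 2 = N / 2 := PySem.Int.floordiv_eq_ediv_of_pos (by norm_num)
  intro fa
  induction fa with
  | zero =>
    intro fb i flag hi hfa hfb
    have hil : ¬ i ≤ lim := by omega
    cases fb with
    | zero => rw [pvWhileA, pvForB]
    | succ fb => rw [pvWhileA, pvForB, if_neg hil]
  | succ fa ih =>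
    intro fb i flag hi hfa hfb
    by_cases hil : i ≤ lim
    · cases fb with
      | zero => omega
      | succ fb =>
        have hiN : i < N := by omega
        have hmem : i ∈ PySem.List.pyRange i N i :=
          (PySem.List.mem_pyRange_iff_of_pos (by omega) i).mpr ⟨le_refl i, hiN, by simp⟩
        have hne : PySem.List.pyRange i N i ≠ [] := List.ne_nil_of_mem hmem
        have hanyB := PySem.List.any_congr_mem (l := PySem.List.pyRange i N i)
          (f := fun x => decide (PySem.List.slice lst (some 0) (some i) = PySem.List.slice lst (some x) (some (x + i))))
          (g := fun x => decide ((lst.length : Int) = 0) ||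
              (decide (x + i ≤ (lst.length : Int)) &&
                decide (i ≤ ((((List.range lst.length).map (fun y => pvLcpB lst y lst.length 0))).getD x.toNat 0 : Int))))
          (fun x hx => check_bracelets_test_eq lst i x hi
            ((PySem.List.mem_pyRange_iff_of_pos (by omega) x).mp hx).1)
        rw [pvWhileA, pvForB, if_pos hil, if_pos hil]
        dsimp only
        rw [check_bracelets_innerA_eq, List.isEmpty_eq_false_iff.mpr hne, ← hanyB]
        by_cases hA : ((PySem.List.pyRange i N i).any
            (fun x => decide (PySem.List.slice lst (some 0) (some i) = PySem.List.slice lst (some x) (some (x + i))))) = true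
        · rw [hA]
          norm_num
          exact ih fb (i + 1) (-1) (by omega) (by omega) (by omega)
        · rw [Bool.not_eq_true] at hA
          rw [hA]
          simp
    · cases fb with
      | zero => rw [pvWhileA, pvForB, if_neg hil]
      | succ fb => rw [pvWhileA, pvForB, if_neg hil, if_neg hil]

-- ===== VERDICT (by name: the statement is the Claim_ definition above) =====
theorem check_bracelets_spec : Claim_equal_check_bracelets := by
  intro lst N _
  show check_bracelets lst N = check_bracelets_alt lst N
  rw [check_bracelets, check_bracelets_alt]
  by_cases hev : PySem.Int.mod N 2 = 0
  · rw [if_neg (fun hc => hc hev), if_neg (fun hc => hc hev)]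
    exact check_bracelets_loop_eq lst N _ hev rfl _ _ 2 0 (by norm_num) (by omega) (by omega)
  · rw [if_pos hev, if_pos hev]
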